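-- pv_equiv track=rewrite | github.com/yupang1122/IMIA_intelligent_diagnose_software | slide_viewer/common/utils.py | slice_rect2
-- ===== SOURCE A (Python) =====
-- from math import ceil
--
-- def slice_rect2(rect_size, tile_size, tile_step):
--     x_size, y_size = rect_size
--     x_step, y_step = tile_step  ##步长
--     cols = ceil(x_size / x_step)  ##列
--     rows = ceil(y_size / y_step)  ##行
--     rects = [
--         (
--             # (j - 1) * x_step + tile_size[0]+distance[0],
--             # (i - 1) * y_step + tile_size[1]+distance[1],
--             int((j - 1) * x_step + tile_size[0]),
--             int((i - 1) * y_step + tile_size[1]),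
--             int(tile_size[0]),
--             int(tile_size[1]),
--         )
--         for i in range(rows)
--         for j in range(cols)
--     ]
--
--     if cols != x_size // x_step:
--         for i in range(rows):
--             rect = list(rects[i * cols + cols - 1])
--             rect[2] = x_size - rect[0]
--             rects[i * cols + cols - 1] = tuple(rect)
--     if rows != y_size // y_step:
--         for j in range(cols):
--             rect = list(rects[(rows - 1) * cols + j])
--             rect[3] = y_size - rect[1]
--             rects[(rows - 1) * cols + j] = tuple(rect)
--
--     # return rects
--     return rects, cols, rows
-- ===== SOURCE B (Python) =====
-- def _slice_axis(size, tile, step):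
--     # 1-D slicing of one axis: the list of (offset, clipped length) spans.
--     n = -(-size // step)  # exact integer ceiling
--     clip = n != size // step
--     return [((k - 1) * step + tile,
--              size - ((k - 1) * step + tile) if clip and k == n - 1 else tile)
--             for k in range(n)]
--
-- def slice_rect2(rect_size, tile_size, tile_step):
--     # Reduce the 2-D tiling to two independent 1-D axis slicings and form
--     # their cartesian product; no 2-D grid is built and then patched.
--     x_size, y_size = rect_size
--     x_step, y_step = tile_step
--     cols = -(-x_size // x_step)
--     rows = -(-y_size // y_step)
--     if rows > 0 and cols > 0:
--         col_spans = _slice_axis(x_size, tile_size[0], x_step)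
--         row_spans = _slice_axis(y_size, tile_size[1], y_step)
--         rects = [(x, y, w, h) for (y, h) in row_spans for (x, w) in col_spans]
--     else:
--         rects = []
--     return rects, cols, rows
-- ===== Notes on version B (the rewrite author's own statement) =====
-- stated objective: alternative
-- what changed: B reduces the 2-D tiling to two independent 1-D axis slicings (one helper computing each axis' (offset, clipped length) spans, applied to the x axis and to the y axis) and returns the cartesian product of the two span lists, instead of A's building a 2-D grid of full-size tiles and then running two separate index-patching passes over the last column and the last row.
import Mathlib
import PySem

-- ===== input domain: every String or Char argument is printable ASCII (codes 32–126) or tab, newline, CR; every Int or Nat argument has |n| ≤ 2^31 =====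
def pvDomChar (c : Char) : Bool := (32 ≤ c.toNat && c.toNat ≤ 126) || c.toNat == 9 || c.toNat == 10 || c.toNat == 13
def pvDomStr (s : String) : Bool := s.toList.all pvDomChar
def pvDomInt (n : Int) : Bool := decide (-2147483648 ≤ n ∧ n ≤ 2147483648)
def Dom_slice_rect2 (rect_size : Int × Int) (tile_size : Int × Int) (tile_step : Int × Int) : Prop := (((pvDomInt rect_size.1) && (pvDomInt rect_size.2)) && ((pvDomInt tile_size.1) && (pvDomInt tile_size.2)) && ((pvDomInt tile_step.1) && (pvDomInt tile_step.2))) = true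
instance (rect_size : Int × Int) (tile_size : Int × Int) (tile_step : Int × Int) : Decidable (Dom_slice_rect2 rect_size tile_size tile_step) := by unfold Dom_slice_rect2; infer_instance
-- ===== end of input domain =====

-- B reduces the 2-D tiling to two independent 1-D axis slicings (one helper per axis giving
-- the (offset, clipped length) spans) and returns their cartesian product, instead of A's
-- 2-D grid of full-size tiles followed by two index-patching edge passes (objective: alternative).

-- ===== PORT A =====
-- math.ceil(a / b): exact integer ceiling; on Dom (|n| ≤ 2^31) float division + math.ceil
-- is exact, and equals -((-a) // b).
def slice_rect2 (rect_size : Int × Int) (tile_size : Int × Int) (tile_step : Int × Int) : (List (Int × Int × Int × Int)) × Int × Int :=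
  let x_size := rect_size.1
  let y_size := rect_size.2
  let x_step := tile_step.1
  let y_step := tile_step.2
  let cols := -(PySem.Int.floordiv (-x_size) x_step)
  let rows := -(PySem.Int.floordiv (-y_size) y_step)
  let rects : List (Int × Int × Int × Int) :=
    (PySem.List.pyRange 0 rows 1).flatMap (fun i =>
      (PySem.List.pyRange 0 cols 1).map (fun j =>
        ((j - 1) * x_step + tile_size.1, (i - 1) * y_step + tile_size.2, tile_size.1, tile_size.2)))
  -- rects[k] read/written with pyGetD/pySetD: Pre_ guarantees the touched indices are in range
  let rects := if cols ≠ PySem.Int.floordiv x_size x_step then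
      (PySem.List.pyRange 0 rows 1).foldl (fun rs i =>
        let rect := PySem.List.pyGetD rs (i * cols + cols - 1) (0, 0, 0, 0)
        PySem.List.pySetD rs (i * cols + cols - 1) (rect.1, rect.2.1, x_size - rect.1, rect.2.2.2)) rects
    else rects
  let rects := if rows ≠ PySem.Int.floordiv y_size y_step then
      (PySem.List.pyRange 0 cols 1).foldl (fun rs j =>
        let rect := PySem.List.pyGetD rs ((rows - 1) * cols + j) (0, 0, 0, 0)
        PySem.List.pySetD rs ((rows - 1) * cols + j) (rect.1, rect.2.1, rect.2.2.1, y_size - rect.2.1)) rects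
    else rects
  (rects, cols, rows)

-- ===== PORT B =====
-- 1-D slicing of one axis: the list of (offset, clipped length) spans
def pvSliceAxis (size : Int) (tile : Int) (step : Int) : List (Int × Int) :=
  let n := -(PySem.Int.floordiv (-size) step)
  let clip : Bool := n != PySem.Int.floordiv size step
  (PySem.List.pyRange 0 n 1).map (fun k =>
    ((k - 1) * step + tile,
     if clip && (k == n - 1) then size - ((k - 1) * step + tile) else tile))

def slice_rect2_alt (rect_size : Int × Int) (tile_size : Int × Int) (tile_step : Int × Int) : (List (Int × Int × Int × Int)) × Int × Int :=
  let cols := -(PySem.Int.floordiv (-rect_size.1) tile_step.1)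
  let rows := -(PySem.Int.floordiv (-rect_size.2) tile_step.2)
  let rects := if 0 < rows ∧ 0 < cols then
      let col_spans := pvSliceAxis rect_size.1 tile_size.1 tile_step.1
      let row_spans := pvSliceAxis rect_size.2 tile_size.2 tile_step.2
      row_spans.flatMap (fun yh => col_spans.map (fun xw => (xw.1, yh.1, xw.2, yh.2)))
    else []
  (rects, cols, rows)

-- ===== PRECONDITION & SPEC =====
-- Pre_ excludes exactly the inputs where the Python A raises: zero steps (ZeroDivisionError)
-- and the inputs where an edge-patching pass indexes into an empty tile list (IndexError:
-- one of rows/cols positive, the other non-positive with its size not step-divisible).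
def Pre_slice_rect2 (rect_size : Int × Int) (tile_size : Int × Int) (tile_step : Int × Int) : Prop :=
  tile_step.1 ≠ 0 ∧ tile_step.2 ≠ 0 ∧
  (-(PySem.Int.floordiv (-rect_size.2) tile_step.2) ≤ 0 ∨
   0 < -(PySem.Int.floordiv (-rect_size.1) tile_step.1) ∨
   -(PySem.Int.floordiv (-rect_size.1) tile_step.1) = PySem.Int.floordiv rect_size.1 tile_step.1) ∧
  (-(PySem.Int.floordiv (-rect_size.1) tile_step.1) ≤ 0 ∨
   0 < -(PySem.Int.floordiv (-rect_size.2) tile_step.2) ∨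
   -(PySem.Int.floordiv (-rect_size.2) tile_step.2) = PySem.Int.floordiv rect_size.2 tile_step.2)
instance (rect_size : Int × Int) (tile_size : Int × Int) (tile_step : Int × Int) : Decidable (Pre_slice_rect2 rect_size tile_size tile_step) := by unfold Pre_slice_rect2; infer_instance

def pvWitness_slice_rect2 : (Int × Int) × (Int × Int) × (Int × Int) := ((5, 4), (3, 2), (2, 2))

def Spec_slice_rect2 (rect_size : Int × Int) (tile_size : Int × Int) (tile_step : Int × Int) (out : (List (Int × Int × Int × Int)) × Int × Int) : Prop := out = slice_rect2_alt rect_size tile_size tile_step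
instance (rect_size : Int × Int) (tile_size : Int × Int) (tile_step : Int × Int) (out : (List (Int × Int × Int × Int)) × Int × Int) : Decidable (Spec_slice_rect2 rect_size tile_size tile_step out) := by unfold Spec_slice_rect2; infer_instance

-- ===== CLAIM (what is proved, stated in full; the proofs are below) =====
def Claim_equal_slice_rect2 : Prop := ∀ (rect_size : Int × Int) (tile_size : Int × Int) (tile_step : Int × Int), Dom_slice_rect2 rect_size tile_size tile_step → Pre_slice_rect2 rect_size tile_size tile_step → Spec_slice_rect2 rect_size tile_size tile_step (slice_rect2 rect_size tile_size tile_step)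

-- ===== LEMMAS AND PROOFS =====

theorem pv_row_set {T : Type} (C p : Nat) (hp : p < C) (f : Nat → T) (v : T) :
    ((List.range C).map f).set p v = (List.range C).map (fun m => if m = p then v else f m) := by
  apply List.ext_getElem
  · simp
  · intro i h1 h2
    simp only [List.getElem_set, List.getElem_map, List.getElem_range]
    by_cases hip : i = p
    · simp [hip]
    · rw [if_neg (fun h : p = i => hip h.symm), if_neg hip]

theorem pv_row_getD {T : Type} (C p : Nat) (hp : p < C) (f : Nat → T) (d : T) :
    ((List.range C).map f).getD p d = f p := by
  rw [List.getD_eq_getElem _ _ (by simpa using hp)]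
  simp

theorem pv_flat_len {T : Type} (C n : Nat) (f : Nat → Nat → T) :
    ((List.range n).flatMap (fun I => (List.range C).map (f I))).length = n * C := by
  induction n with
  | zero => simp
  | succ k ih => rw [List.range_succ]; simp [ih, Nat.succ_mul]

theorem pv_patchX {T : Type} (C R : Nat) (hC : 0 < C) (f : Nat → Nat → T) (upd : T → T) (d : T) :
    ∀ (m k : Nat) (done : List T), m = R - k → k ≤ R → done.length = k * C →
    (PySem.List.pyRange (↑k) (↑R) 1).foldl
      (fun rs i => PySem.List.pySetD rs (i * ↑C + ↑C - 1) (upd (PySem.List.pyGetD rs (i * ↑C + ↑C - 1) d)))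
      (done ++ (List.range' k m).flatMap (fun I => (List.range C).map (f I)))
    = done ++ (List.range' k m).flatMap (fun I => (List.range C).map (fun J => if J = C - 1 then upd (f I (C - 1)) else f I J)) := by
  intro m
  induction m with
  | zero =>
    intro k done hm hk hlen
    rw [PySem.List.pyRange_one_eq_nil (by omega)]
    simp
  | succ m ih =>
    intro k done hm hk hlen
    rw [PySem.List.pyRange_one_cons (by omega : (k:Int) < (R:Int))]
    rw [List.foldl_cons]
    have hidx : (k:Int) * ↑C + ↑C - 1 = ((k * C + (C - 1) : Nat) : Int) := by push_cast; omega
    rw [List.range'_succ, List.flatMap_cons]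
    have hget : PySem.List.pyGetD (done ++ ((List.range C).map (f k) ++ (List.range' (k+1) m).flatMap (fun I => (List.range C).map (f I)))) ((k:Int) * ↑C + ↑C - 1) d = f k (C - 1) := by
      rw [hidx, PySem.List.pyGetD_natCast]
      rw [List.getD_append_right _ _ _ _ (by omega)]
      rw [hlen]
      have h2 : k * C + (C - 1) - k * C = C - 1 := by omega
      rw [h2]
      rw [List.getD_append _ _ _ _ (by simp; omega)]
      exact pv_row_getD C (C-1) (by omega) _ d
    rw [hget, hidx, PySem.List.pySetD_natCast]
    rw [List.set_append_right _ _ (by omega)]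
    rw [hlen]
    have h2 : k * C + (C - 1) - k * C = C - 1 := by omega
    rw [h2]
    rw [List.set_append_left _ _ (by simp; omega)]
    rw [pv_row_set C (C-1) (by omega) (f k) _]
    have hcast : ((k:Int) + 1) = ((k+1 : Nat) : Int) := by push_cast; ring
    rw [hcast]
    rw [List.flatMap_cons, ← List.append_assoc, ← List.append_assoc]
    exact ih (k+1) (done ++ (List.range C).map (fun m => if m = C - 1 then upd (f k (C - 1)) else f k m)) (by omega) (by omega) (by simp [hlen]; ring)

theorem pv_patchY {T : Type} (C P : Nat) (upd : T → T) (d : T) (f : Nat → T) :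
    ∀ (m j : Nat) (front : List T), m = C - j → j ≤ C → front.length = P →
    (PySem.List.pyRange (↑j) (↑C) 1).foldl
      (fun rs jj => PySem.List.pySetD rs (↑P + jj) (upd (PySem.List.pyGetD rs (↑P + jj) d)))
      (front ++ (List.range C).map (fun n => if n < j then upd (f n) else f n))
    = front ++ (List.range C).map (fun n => upd (f n)) := by
  intro m
  induction m with
  | zero =>
    intro j front hm hj hlen
    rw [PySem.List.pyRange_one_eq_nil (by omega)]
    simp only [List.foldl_nil]
    congr 1
    apply List.map_congr_left
    intro n hn
    rw [if_pos (by simp at hn; omega)]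
  | succ m ih =>
    intro j front hm hj hlen
    rw [PySem.List.pyRange_one_cons (by omega : (j:Int) < (C:Int))]
    rw [List.foldl_cons]
    have hidx : (P:Int) + ↑j = ((P + j : Nat) : Int) := by push_cast; ring
    have hget : PySem.List.pyGetD (front ++ (List.range C).map (fun n => if n < j then upd (f n) else f n)) ((P:Int) + ↑j) d = f j := by
      rw [hidx, PySem.List.pyGetD_natCast]
      rw [List.getD_append_right _ _ _ _ (by omega)]
      rw [hlen]
      have h2 : P + j - P = j := by omega
      rw [h2]
      rw [pv_row_getD C j (by omega) _ d]
      simp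
    rw [hget, hidx, PySem.List.pySetD_natCast]
    rw [List.set_append_right _ _ (by omega)]
    rw [hlen]
    have h2 : P + j - P = j := by omega
    rw [h2]
    rw [pv_row_set C j (by omega) _ _]
    have hrow : (List.range C).map (fun m => if m = j then upd (f j) else if m < j then upd (f m) else f m)
        = (List.range C).map (fun n => if n < j + 1 then upd (f n) else f n) := by
      apply List.map_congr_left
      intro n hn
      by_cases h1 : n = j
      · simp [h1]
      · by_cases h2 : n < j
        · rw [if_neg h1, if_pos h2, if_pos (by omega)]
        · rw [if_neg h1, if_neg h2, if_neg (by omega)]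
    rw [hrow]
    have hcast : ((j:Int) + 1) = ((j+1 : Nat) : Int) := by push_cast; ring
    rw [hcast]
    exact ih (j+1) front (by omega) (by omega) hlen

theorem pv_patchY0 {T : Type} (C P : Nat) (upd : T → T) (d : T) (f : Nat → T) (front : List T) (hlen : front.length = P) :
    ((List.range C).map (fun k : Nat => (k:Int))).foldl
      (fun rs jj => PySem.List.pySetD rs (↑P + jj) (upd (PySem.List.pyGetD rs (↑P + jj) d)))
      (front ++ (List.range C).map f)
    = front ++ (List.range C).map (fun n => upd (f n)) := by
  have h := pv_patchY C P upd d f C 0 front (by omega) (by omega) hlen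
  simp only [Nat.cast_zero] at h
  rw [PySem.List.pyRange_zero_natCast] at h
  have he : (fun n : Nat => if n < 0 then upd (f n) else f n) = fun n => f n := by
    funext n; rw [if_neg (Nat.not_lt_zero n)]
  rw [he] at h
  exact h

-- ===== VERDICT (by name: the statement is the Claim_ definition above) =====
theorem slice_rect2_spec : Claim_equal_slice_rect2 := by
  unfold Claim_equal_slice_rect2
  intro rect_size tile_size tile_step hDom hPre
  obtain ⟨x, y⟩ := rect_size
  obtain ⟨tw, th⟩ := tile_size
  obtain ⟨xs, ys⟩ := tile_step
  obtain ⟨hxs0, hys0, hp1, hp2⟩ := hPre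
  unfold Spec_slice_rect2 slice_rect2 slice_rect2_alt pvSliceAxis
  dsimp only
  set fdx := PySem.Int.floordiv x xs with hfdx
  set fdy := PySem.Int.floordiv y ys with hfdy
  set c := -(PySem.Int.floordiv (-x) xs) with hc
  set r := -(PySem.Int.floordiv (-y) ys) with hr
  simp only [List.flatMap_map, List.map_map, Function.comp_def]
  simp only [Prod.mk.injEq, and_true]
  rcases (by omega : r ≤ 0 ∨ 0 < r) with hr0 | hr0
  · -- r ≤ 0 : every tile list is empty
    rw [if_neg (by omega : ¬ (0 < r ∧ 0 < c))]
    rw [PySem.List.pyRange_one_eq_nil hr0]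
    simp only [List.flatMap_nil, List.foldl_nil, ite_self]
    rcases hp2 with hc0 | hrpos | hry
    · rw [PySem.List.pyRange_one_eq_nil hc0]
      simp
    · omega
    · rw [if_neg (by simp [hry])]
  · rcases (by omega : c ≤ 0 ∨ 0 < c) with hc0 | hc0
    · -- c ≤ 0 : every row is empty; Pre_ forces the column patch off
      have hcx : c = fdx := by rcases hp1 with h | h | h <;> omega
      rw [if_neg (by omega : ¬ (0 < r ∧ 0 < c))]
      rw [PySem.List.pyRange_one_eq_nil hc0]
      simp [hcx]
    · -- main case : 0 < r, 0 < c
      obtain ⟨C, hC⟩ : ∃ C : Nat, c = (C:Int) := ⟨c.toNat, by omega⟩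
      obtain ⟨R, hR⟩ : ∃ R : Nat, r = (R:Int) := ⟨r.toNat, by omega⟩
      have hCpos : 0 < C := by omega
      have hRpos : 0 < R := by omega
      rw [hC, hR]
      rw [if_pos (by constructor <;> omega : (0:Int) < (R:Int) ∧ (0:Int) < (C:Int))]
      simp only [PySem.List.pyRange_zero_natCast, List.flatMap_map, List.map_map, Function.comp_def]
      simp only [Bool.and_eq_true, bne_iff_ne, beq_iff_eq, ne_eq]
      have hJc : ∀ J : Nat, ((J:Int) = (C:Int) - 1) = (J = C - 1) := fun J => propext (by omega)
      have hIr : ∀ I : Nat, ((I:Int) = (R:Int) - 1) = (I = R - 1) := fun I => propext (by omega)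
      simp only [hJc, hIr]
      by_cases hcx : (C:Int) = fdx
      · -- no column clip
        rw [if_neg (not_not_intro hcx)]
        have hBw : ∀ J : Nat, ((¬(C:Int) = fdx) ∧ J = C - 1) = False := fun J => propext (by simp [hcx])
        simp only [hBw, if_false]
        by_cases hry : (R:Int) = fdy
        · -- no row clip either
          rw [if_neg (not_not_intro hry)]
          have hBh : ∀ I : Nat, ((¬(R:Int) = fdy) ∧ I = R - 1) = False := fun I => propext (by simp [hry])
          simp only [hBh, if_false]
        · -- row clip only
          rw [if_pos hry]
          have hBh : ∀ I : Nat, ((¬(R:Int) = fdy) ∧ I = R - 1) = (I = R - 1) := fun I => propext (by simp [hry])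
          simp only [hBh]
          have hsplit : List.range R = List.range (R-1) ++ [R-1] := by
            have h1 : R = (R-1)+1 := by omega
            conv_lhs => rw [h1]
            rw [List.range_succ]
          rw [hsplit]
          simp only [List.flatMap_append, List.flatMap_singleton]
          have hco : ((R:Int) - 1) * (C:Int) = (((R-1)*C : Nat) : Int) := by
            rw [Nat.cast_mul, Nat.cast_sub (by omega : 1 ≤ R)]; norm_num
          rw [hco]
          rw [pv_patchY0 C ((R-1)*C) (fun t => (t.1, t.2.1, t.2.2.1, y - t.2.1)) ((0:Int),(0:Int),(0:Int),(0:Int)) _ _ (pv_flat_len C (R-1) (fun I J => ((((J:Int)) - 1) * xs + tw, (((I:Int)) - 1) * ys + th, tw, th)))]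
          congr 1
          · apply List.flatMap_congr
            intro I hI
            simp only [List.mem_range] at hI
            apply List.map_congr_left
            intro J hJ
            rw [if_neg (by omega : ¬ I = R - 1)]
      · -- column clip
        rw [if_pos hcx]
        have hBw : ∀ J : Nat, ((¬(C:Int) = fdx) ∧ J = C - 1) = (J = C - 1) := fun J => propext (by simp [hcx])
        simp only [hBw]
        have hX := pv_patchX C R hCpos
          (fun I J => ((((J:Int)) - 1) * xs + tw, (((I:Int)) - 1) * ys + th, tw, th))
          (fun t => (t.1, t.2.1, x - t.1, t.2.2.2)) ((0:Int), (0:Int), (0:Int), (0:Int))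
          R 0 [] (by omega) (by omega) (by simp)
        simp only [Nat.cast_zero, List.nil_append, ← List.range_eq_range'] at hX
        rw [PySem.List.pyRange_zero_natCast] at hX
        rw [hX]
        by_cases hry : (R:Int) = fdy
        · -- column clip only
          rw [if_neg (not_not_intro hry)]
          have hBh : ∀ I : Nat, ((¬(R:Int) = fdy) ∧ I = R - 1) = False := fun I => propext (by simp [hry])
          simp only [hBh, if_false]
          apply List.flatMap_congr
          intro I hI
          apply List.map_congr_left
          intro J hJ
          rcases eq_or_ne J (C-1) with h | h
          · subst h
            rw [if_pos rfl, if_pos rfl]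
          · rw [if_neg h, if_neg h]
        · -- both clips
          rw [if_pos hry]
          have hBh : ∀ I : Nat, ((¬(R:Int) = fdy) ∧ I = R - 1) = (I = R - 1) := fun I => propext (by simp [hry])
          simp only [hBh]
          have hsplit : List.range R = List.range (R-1) ++ [R-1] := by
            have h1 : R = (R-1)+1 := by omega
            conv_lhs => rw [h1]
            rw [List.range_succ]
          rw [hsplit]
          simp only [List.flatMap_append, List.flatMap_singleton]
          have hco : ((R:Int) - 1) * (C:Int) = (((R-1)*C : Nat) : Int) := by
            rw [Nat.cast_mul, Nat.cast_sub (by omega : 1 ≤ R)]; norm_num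
          rw [hco]
          rw [pv_patchY0 C ((R-1)*C) (fun t => (t.1, t.2.1, t.2.2.1, y - t.2.1)) ((0:Int),(0:Int),(0:Int),(0:Int)) _ _ (pv_flat_len C (R-1) (fun I J => if J = C - 1 then ((↑(C-1) - 1) * xs + tw, (((I:Int)) - 1) * ys + th, x - ((↑(C-1) - 1) * xs + tw), th) else ((((J:Int)) - 1) * xs + tw, (((I:Int)) - 1) * ys + th, tw, th)))]
          congr 1
          · apply List.flatMap_congr
            intro I hI
            simp only [List.mem_range] at hI
            apply List.map_congr_left
            intro J hJ
            rw [if_neg (by omega : ¬ I = R - 1)]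
            rcases eq_or_ne J (C-1) with h | h
            · subst h
              rw [if_pos rfl, if_pos rfl]
            · rw [if_neg h, if_neg h]
          · apply List.map_congr_left
            intro J hJ
            rcases eq_or_ne J (C-1) with h | h
            · subst h
              simp
            · simp [h]
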